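-- pv_equiv track=rewrite | github.com/Kawser-nerd/CLCDSA | Source Codes/AtCoder/abc031/C/4503416.py | aoki
-- ===== SOURCE A (Python) =====
-- def aoki(i,array):
--     maxi = -100000000
--     for j in range(len(array)):
--         tmp = 0
--         if j != i:
--             if j < i:
--                 T = array[j:i+1]
--             elif j > i :
--                 T = array[i:j+1]
--             for k in range(len(T)):
--                 if k % 2 == 1:
--                     tmp += T[k]
--             if maxi < tmp:
--                 choice = j
--                 maxi = tmp
--     return choice
-- ===== SOURCE B (Python) =====
-- def aoki(i, array):
--     # Parity prefix sums make each candidate sum O(1): one pass to build, one pass to scan.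
--     n = len(array)
--     pre0 = [0]  # pre0[m] = sum of array[x] for x < m with x even
--     pre1 = [0]  # pre1[m] = sum of array[x] for x < m with x odd
--     s0 = 0
--     s1 = 0
--     for x in range(n):
--         if x % 2 == 0:
--             s0 += array[x]
--         else:
--             s1 += array[x]
--         pre0.append(s0)
--         pre1.append(s1)
--     def oddsum(a, b):
--         # sum over odd positions of array[a:b]  (0 <= a <= b <= n): absolute indices a+1, a+3, ...
--         if (a + 1) % 2 == 1:
--             return pre1[b] - pre1[a]
--         return pre0[b] - pre0[a]
--     best = -100000000
--     choice = 0
--     for j in range(n):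
--         if j == i:
--             continue
--         if j < i:
--             tmp = oddsum(j, min(i + 1, n))
--         else:
--             tmp = oddsum(i, j + 1)
--         if best < tmp:
--             best = tmp
--             choice = j
--     return choice
-- ===== Notes on version B (the rewrite author's own statement) =====
-- stated objective: faster
-- what changed: B precomputes parity-indexed prefix sums in one pass so each candidate's odd-position slice sum is a subtraction, replacing A's inner loop over every slice.
-- outside the precondition, e.g. on aoki(-1, [1, 2, 3]): A returns 0, B returns 2
import Mathlib
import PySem

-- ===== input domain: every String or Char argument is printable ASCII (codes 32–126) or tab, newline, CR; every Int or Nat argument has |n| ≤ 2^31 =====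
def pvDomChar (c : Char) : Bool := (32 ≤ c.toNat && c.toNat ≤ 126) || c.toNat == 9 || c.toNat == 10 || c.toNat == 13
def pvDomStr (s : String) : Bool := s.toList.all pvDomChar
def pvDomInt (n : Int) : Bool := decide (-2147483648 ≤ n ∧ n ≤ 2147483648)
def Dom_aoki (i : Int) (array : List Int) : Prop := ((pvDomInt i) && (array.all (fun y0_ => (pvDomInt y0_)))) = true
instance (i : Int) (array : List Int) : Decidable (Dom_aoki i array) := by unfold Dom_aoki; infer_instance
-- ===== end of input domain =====

-- B replaces A's per-candidate inner loop by parity prefix sums (each candidate sum is one subtraction).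

-- ===== PORT A =====
-- the loop body of A, one iteration per j (Python's `for j in range(len(array))`)
def aokiStep (i : Int) (array : List Int) (st : Int × Option Int) (j : Nat) : Int × Option Int :=
  let tmp : Int := 0
  if (j : Int) ≠ i then
    let T : List Int :=
      if (j : Int) < i then PySem.List.slice array (some (j : Int)) (some (i + 1))
      else PySem.List.slice array (some i) (some ((j : Int) + 1))
    let tmp := (List.range T.length).foldl
      (fun (s : Int) (k : Nat) => if k % 2 == 1 then s + PySem.List.pyGetD T (k : Int) 0 else s) tmp
    if st.1 < tmp then (tmp, some (j : Int)) else st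
  else st

def aoki (i : Int) (array : List Int) : Int :=
  -- Python's `choice` starts unbound (NameError when never assigned: excluded by Pre_); Option models it
  (((List.range array.length).foldl (aokiStep i array) (-100000000, (none : Option Int))).2).getD 0

-- ===== PORT B =====
-- Source B's nested helper `oddsum(a, b)`
def oddsumB (pre0 pre1 : List Int) (a b : Int) : Int :=
  -- pre[x]: Python indexing (negative wraps); pyGetD is exact where Python returns (Pre_ keeps 0 ≤ a,b ≤ n)
  if PySem.Int.mod (a + 1) 2 == 1 then PySem.List.pyGetD pre1 b 0 - PySem.List.pyGetD pre1 a 0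
  else PySem.List.pyGetD pre0 b 0 - PySem.List.pyGetD pre0 a 0

-- the loop body of Source B's scan over j
def altStep (i : Int) (n : Nat) (pre0 pre1 : List Int) (st : Int × Int) (j : Nat) : Int × Int :=
  if (j : Int) == i then st
  else
    let tmp :=
      if (j : Int) < i then oddsumB pre0 pre1 (j : Int) (min (i + 1) (n : Int))
      else oddsumB pre0 pre1 i ((j : Int) + 1)
    if st.1 < tmp then (tmp, (j : Int)) else st

def aoki_alt (i : Int) (array : List Int) : Int :=
  let n := array.length
  -- one pass building the parity prefix-sum tables (s0, s1, pre0, pre1)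
  let st := (List.range n).foldl
    (fun (st : Int × Int × List Int × List Int) x =>
      let s0 := if x % 2 == 0 then st.1 + array.getD x 0 else st.1
      let s1 := if x % 2 == 1 then st.2.1 + array.getD x 0 else st.2.1
      (s0, s1, st.2.2.1 ++ [s0], st.2.2.2 ++ [s1])) (0, 0, [0], [0])
  ((List.range n).foldl (altStep i n st.2.2.1 st.2.2.2) (-100000000, 0)).2

-- ===== PRECONDITION & SPEC =====
-- parSum p k l = sum of elements of l whose absolute index (the head having index k) is ≡ p (mod 2)
def parSum (p : Nat) (k : Nat) : List Int → Int
  | [] => 0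
  | x :: t => (if k % 2 = p % 2 then x else 0) + parSum p (k + 1) t

-- the candidate sum A computes for index j (sum of odd positions of the slice between j and i)
def pvTmp (i : Int) (array : List Int) (j : Nat) : Int :=
  if (j : Int) < i then parSum 1 0 ((array.drop j).take ((i + 1).toNat - j))
  else parSum 1 0 ((array.drop i.toNat).take (j + 1 - i.toNat))

-- Pre_ keeps the task's natural domain: it excludes negative i (i is meant as an index; there A's
-- slice array[i:j+1] counts from the end while j<i / j>i still compare plain numbers) and inputs
-- where no candidate sum exceeds -100000000, on which A raises NameError (`choice` never assigned).
def Pre_aoki (i : Int) (array : List Int) : Prop :=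
  0 ≤ i ∧ ∃ j ∈ List.range array.length, (j : Int) ≠ i ∧ -100000000 < pvTmp i array j
instance (i : Int) (array : List Int) : Decidable (Pre_aoki i array) := by
  unfold Pre_aoki; infer_instance

def pvWitness_aoki : Int × List Int := (0, [1, 2])

def Spec_aoki (i : Int) (array : List Int) (out : Int) : Prop := out = aoki_alt i array
instance (i : Int) (array : List Int) (out : Int) : Decidable (Spec_aoki i array out) := by
  unfold Spec_aoki; infer_instance

-- ===== CLAIM (what is proved, stated in full; the proofs are below) =====
def Claim_equal_aoki : Prop := ∀ (i : Int) (array : List Int), Dom_aoki i array → Pre_aoki i array → Spec_aoki i array (aoki i array)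

-- ===== LEMMAS AND PROOFS =====

theorem parSum_append (u v : List Int) (p : Nat) :
    ∀ k, parSum p k (u ++ v) = parSum p k u + parSum p (k + u.length) v := by
  induction u with
  | nil => intro k; simp [parSum]
  | cons x t ih =>
    intro k
    simp only [List.cons_append, parSum, ih (k + 1), List.length_cons]
    ring_nf

theorem parSum_shift (l : List Int) (d : Nat) :
    ∀ p k, parSum p k l = parSum (p + d) (k + d) l := by
  induction l with
  | nil => intro p k; simp [parSum]
  | cons x t ih =>
    intro p k
    simp only [parSum]
    rw [show k + d + 1 = (k + 1) + d from by omega, ← ih p (k + 1)]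
    have : (k % 2 = p % 2) ↔ ((k + d) % 2 = (p + d) % 2) := by omega
    by_cases h : k % 2 = p % 2
    · rw [if_pos h, if_pos (this.mp h)]
    · rw [if_neg h, if_neg (fun hc => h (this.mpr hc))]

theorem parSum_mod (l : List Int) : ∀ p k, parSum p k l = parSum (p % 2) k l := by
  induction l with
  | nil => intro p k; rfl
  | cons x t ih =>
    intro p k
    simp only [parSum, ih p (k + 1)]
    have : (k % 2 = p % 2) ↔ (k % 2 = p % 2 % 2) := by omega
    by_cases h : k % 2 = p % 2
    · rw [if_pos h, if_pos (this.mp h)]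
    · rw [if_neg h, if_neg (fun hc => h (this.mpr hc))]

-- the inner index loop of A reads only positions < T.length, so appending one element only adds its term
theorem innerFold_frozen (T : List Int) (x : Int) :
    ∀ (ks : List Nat), (∀ k ∈ ks, k < T.length) → ∀ s : Int,
      ks.foldl (fun (s : Int) (k : Nat) => if k % 2 == 1 then s + PySem.List.pyGetD (T ++ [x]) (k : Int) 0 else s) s
      = ks.foldl (fun (s : Int) (k : Nat) => if k % 2 == 1 then s + PySem.List.pyGetD T (k : Int) 0 else s) s := by
  intro ks
  induction ks with
  | nil => intro _ s; rfl
  | cons k t ih =>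
    intro h s
    have hk : k < T.length := h k (List.mem_cons_self ..)
    have ht : ∀ k ∈ t, k < T.length := fun k hm => h k (List.mem_cons_of_mem _ hm)
    simp only [List.foldl_cons]
    rw [ih ht]
    congr 1
    have : PySem.List.pyGetD (T ++ [x]) (k : Int) 0 = PySem.List.pyGetD T (k : Int) 0 := by
      rw [PySem.List.pyGetD_natCast, PySem.List.pyGetD_natCast]
      simp [List.getD_eq_getElem?_getD, List.getElem?_append_left hk]
    rw [this]

theorem innerFold_eq (T : List Int) :
    ∀ s : Int, (List.range T.length).foldl
      (fun (s : Int) (k : Nat) => if k % 2 == 1 then s + PySem.List.pyGetD T (k : Int) 0 else s) s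
      = s + parSum 1 0 T := by
  induction T using List.reverseRecOn with
  | nil => intro s; simp [parSum]
  | append_singleton T x ih =>
    intro s
    rw [List.length_append, List.length_singleton, List.range_succ, List.foldl_append]
    rw [innerFold_frozen T x _ (fun k hk => List.mem_range.mp hk)]
    rw [ih s]
    simp only [List.foldl_cons, List.foldl_nil]
    have hx : PySem.List.pyGetD (T ++ [x]) (T.length : Int) 0 = x := by
      rw [PySem.List.pyGetD_natCast]
      simp [List.getD_eq_getElem?_getD]
    have hp : parSum 1 0 (T ++ [x]) = parSum 1 0 T + (if T.length % 2 = 1 then x else 0) := by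
      rw [parSum_append]
      simp [parSum]
    rw [hp, hx]
    by_cases h : T.length % 2 = 1
    · simp [h]; ring
    · simp [Nat.mod_two_ne_one.mp h]

-- odd positions of the segment [a, b) as a difference of absolute-parity prefix sums
theorem seg_eq (array : List Int) (a b : Nat) (hab : a ≤ b) (han : a ≤ array.length) :
    parSum 1 0 ((array.drop a).take (b - a))
      = parSum (a + 1) 0 (array.take b) - parSum (a + 1) 0 (array.take a) := by
  have hsplit : array.take b = array.take a ++ (array.drop a).take (b - a) := by
    rw [← List.take_add]
    congr 1
    omega
  rw [hsplit, parSum_append]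
  have hlen : (array.take a).length = a := by simp [han]
  rw [hlen]
  have hsh : parSum 1 0 ((array.drop a).take (b - a))
      = parSum (a + 1) (0 + a) ((array.drop a).take (b - a)) := by
    rw [parSum_shift ((array.drop a).take (b - a)) a 1 0, Nat.add_comm 1 a]
  rw [← hsh]
  ring

-- the prefix-table build loop of B, characterized
theorem build_eq (array : List Int) :
    ∀ m, m ≤ array.length →
      (List.range m).foldl
        (fun (st : Int × Int × List Int × List Int) x =>
          let s0 := if x % 2 == 0 then st.1 + array.getD x 0 else st.1
          let s1 := if x % 2 == 1 then st.2.1 + array.getD x 0 else st.2.1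
          (s0, s1, st.2.2.1 ++ [s0], st.2.2.2 ++ [s1])) (0, 0, [0], [0])
      = (parSum 0 0 (array.take m), parSum 1 0 (array.take m),
         (List.range (m + 1)).map (fun t => parSum 0 0 (array.take t)),
         (List.range (m + 1)).map (fun t => parSum 1 0 (array.take t))) := by
  intro m
  induction m with
  | zero => intro _; simp [parSum]
  | succ m ih =>
    intro hm
    have hm' : m ≤ array.length := Nat.le_of_succ_le hm
    have hmlt : m < array.length := hm
    rw [List.range_succ, List.foldl_append, ih hm']
    simp only [List.foldl_cons, List.foldl_nil]
    have htake : array.take (m + 1) = array.take m ++ [array[m]] := by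
      rw [List.take_add_one]
      simp [List.getElem?_eq_getElem hmlt]
    have hlen : (array.take m).length = m := by simp [hm']
    have hget : array.getD m 0 = array[m] := by
      simp [List.getD_eq_getElem?_getD, List.getElem?_eq_getElem hmlt]
    have h0 : parSum 0 0 (array.take (m + 1))
        = (if m % 2 == 0 then parSum 0 0 (array.take m) + array.getD m 0 else parSum 0 0 (array.take m)) := by
      rw [htake, parSum_append, hlen, hget]
      by_cases h : m % 2 = 0 <;> simp [parSum, h]
    have h1 : parSum 1 0 (array.take (m + 1))
        = (if m % 2 == 1 then parSum 1 0 (array.take m) + array.getD m 0 else parSum 1 0 (array.take m)) := by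
      rw [htake, parSum_append, hlen, hget]
      by_cases h : m % 2 = 1 <;> simp [parSum, h]
    rw [List.range_succ (n := m + 1)]
    simp only [List.map_append, List.map_cons, List.map_nil, ← h0, ← h1]

theorem getD_map_range_parSum (f : Nat → Int) (m b : Nat) (hb : b ≤ m) :
    ((List.range (m + 1)).map f).getD b 0 = f b := by
  rw [List.getD_eq_getElem?_getD, List.getElem?_map]
  rw [List.getElem?_range (by omega)]
  rfl

-- oddsumB on nonnegative (Nat-cast) arguments, in plain List.getD form
theorem oddsumB_cast (pre0 pre1 : List Int) (a b : Nat) :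
    oddsumB pre0 pre1 (a : Int) (b : Int)
      = (if (a + 1) % 2 == 1 then pre1.getD b 0 - pre1.getD a 0
         else pre0.getD b 0 - pre0.getD a 0) := by
  unfold oddsumB
  have hm : PySem.Int.mod ((a : Int) + 1) 2 = (((a + 1) % 2 : Nat) : Int) := by
    rw [show ((a : Int) + 1) = ((a + 1 : Nat) : Int) from by push_cast; ring]
    exact_mod_cast PySem.Int.mod_natCast (a + 1) 2
  rw [hm]
  simp only [PySem.List.pyGetD_natCast]
  by_cases h : (a + 1) % 2 = 1
  · rw [if_pos (by simp [h]), if_pos (by simp [h])]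
  · have h0 : (a + 1) % 2 = 0 := by omega
    rw [if_neg (by simp [h0]), if_neg (by simp [h0])]

-- equality of the candidate sums computed by A (slice + inner loop) and B (prefix-sum subtraction)
theorem tmp_eq (i : Int) (array : List Int) (j : Nat) (hi : 0 ≤ i)
    (hj : j < array.length) :
    (List.range (if (j : Int) < i then PySem.List.slice array (some (j : Int)) (some (i + 1))
                 else PySem.List.slice array (some i) (some ((j : Int) + 1))).length).foldl
      (fun (s : Int) (k : Nat) => if k % 2 == 1 then s +
        PySem.List.pyGetD (if (j : Int) < i then PySem.List.slice array (some (j : Int)) (some (i + 1))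
                           else PySem.List.slice array (some i) (some ((j : Int) + 1))) (k : Int) 0 else s) 0
    = (if (j : Int) < i
        then oddsumB ((List.range (array.length + 1)).map (fun t => parSum 0 0 (array.take t)))
                     ((List.range (array.length + 1)).map (fun t => parSum 1 0 (array.take t)))
                     (j : Int) (min (i + 1) (array.length : Int))
        else oddsumB ((List.range (array.length + 1)).map (fun t => parSum 0 0 (array.take t)))
                     ((List.range (array.length + 1)).map (fun t => parSum 1 0 (array.take t)))
                     i ((j : Int) + 1)) := by
  by_cases hlt : (j : Int) < i
  · -- j < i : slice array[j : i+1], B uses oddsum(j, min(i+1, n))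
    rw [if_pos hlt, if_pos hlt]
    have hji : j < (i + 1).toNat := by omega
    have hslice : PySem.List.slice array (some (j : Int)) (some (i + 1))
        = (array.drop j).take ((i + 1).toNat - j) := by
      rw [PySem.List.slice_toNat array (by positivity) (by omega)]
      simp
    set b := min (i + 1).toNat array.length with hbdef
    have hseg : (array.drop j).take ((i + 1).toNat - j) = (array.drop j).take (b - j) := by
      rw [List.take_eq_take_iff]
      simp only [List.length_drop]
      omega
    rw [hslice, innerFold_eq, hseg, seg_eq array j b (by omega) (by omega)]
    rw [show min (i + 1) (array.length : Int) = ((b : Nat) : Int) from by omega, oddsumB_cast]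
    rw [getD_map_range_parSum _ _ _ (by omega), getD_map_range_parSum _ _ _ (by omega),
        getD_map_range_parSum _ _ _ (by omega), getD_map_range_parSum _ _ _ (by omega)]
    rw [parSum_mod _ (j + 1) 0, parSum_mod _ (j + 1) 0]
    by_cases h : (j + 1) % 2 = 1
    · simp [h]
    · have h0 : (j + 1) % 2 = 0 := by omega
      simp [h0]
  · -- j > i : slice array[i : j+1], B uses oddsum(i, j+1)
    rw [if_neg hlt, if_neg hlt]
    have hij : i.toNat ≤ j := by omega
    have hslice : PySem.List.slice array (some i) (some ((j : Int) + 1))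
        = (array.drop i.toNat).take (j + 1 - i.toNat) := by
      have hc : ((j : Int) + 1).toNat = j + 1 := by omega
      rw [PySem.List.slice_toNat array hi (by positivity), hc]
    rw [hslice, innerFold_eq, seg_eq array i.toNat (j + 1) (by omega) (by omega)]
    rw [show ((j : Int) + 1) = ((j + 1 : Nat) : Int) from by push_cast; ring,
        ← Int.toNat_of_nonneg hi, oddsumB_cast]
    simp only [Int.toNat_natCast]
    rw [getD_map_range_parSum _ _ _ (by omega), getD_map_range_parSum _ _ _ (by omega),
        getD_map_range_parSum _ _ _ (by omega), getD_map_range_parSum _ _ _ (by omega)]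
    rw [parSum_mod _ (i.toNat + 1) 0, parSum_mod _ (i.toNat + 1) 0]
    by_cases h : (i.toNat + 1) % 2 = 1
    · simp [h]
    · have h0 : (i.toNat + 1) % 2 = 0 := by omega
      simp [h0]

-- lockstep simulation of the two scans over j
theorem fold_sim (i : Int) (array : List Int) (hi : 0 ≤ i) :
    ∀ (js : List Nat), (∀ j ∈ js, j < array.length) → ∀ (m : Int) (o : Option Int),
      (js.foldl (aokiStep i array) (m, o)).1
        = (js.foldl (altStep i array.length
            ((List.range (array.length + 1)).map (fun t => parSum 0 0 (array.take t)))
            ((List.range (array.length + 1)).map (fun t => parSum 1 0 (array.take t)))) (m, o.getD 0)).1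
      ∧ (js.foldl (aokiStep i array) (m, o)).2.getD 0
        = (js.foldl (altStep i array.length
            ((List.range (array.length + 1)).map (fun t => parSum 0 0 (array.take t)))
            ((List.range (array.length + 1)).map (fun t => parSum 1 0 (array.take t)))) (m, o.getD 0)).2 := by
  intro js
  induction js with
  | nil => intro _ m o; exact ⟨rfl, rfl⟩
  | cons j t ih =>
    intro h m o
    have hj : j < array.length := h j (List.mem_cons_self ..)
    have ht : ∀ j ∈ t, j < array.length := fun j hm => h j (List.mem_cons_of_mem _ hm)
    simp only [List.foldl_cons]
    by_cases hne : (j : Int) = i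
    · unfold aokiStep altStep
      rw [if_neg (by simp [hne]), if_pos (by simp [hne])]
      exact ih ht m o
    · have hstep : aokiStep i array (m, o) j
          = (let tmp := (if (j : Int) < i
                then oddsumB ((List.range (array.length + 1)).map (fun t => parSum 0 0 (array.take t)))
                             ((List.range (array.length + 1)).map (fun t => parSum 1 0 (array.take t)))
                             (j : Int) (min (i + 1) (array.length : Int))
                else oddsumB ((List.range (array.length + 1)).map (fun t => parSum 0 0 (array.take t)))
                             ((List.range (array.length + 1)).map (fun t => parSum 1 0 (array.take t)))
                             i ((j : Int) + 1));
             if m < tmp then (tmp, some (j : Int)) else (m, o)) := by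
        unfold aokiStep
        rw [if_pos hne]
        simp only
        rw [tmp_eq i array j hi hj]
      have hstep2 : altStep i array.length
            ((List.range (array.length + 1)).map (fun t => parSum 0 0 (array.take t)))
            ((List.range (array.length + 1)).map (fun t => parSum 1 0 (array.take t))) (m, o.getD 0) j
          = (let tmp := (if (j : Int) < i
                then oddsumB ((List.range (array.length + 1)).map (fun t => parSum 0 0 (array.take t)))
                             ((List.range (array.length + 1)).map (fun t => parSum 1 0 (array.take t)))
                             (j : Int) (min (i + 1) (array.length : Int))
                else oddsumB ((List.range (array.length + 1)).map (fun t => parSum 0 0 (array.take t)))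
                             ((List.range (array.length + 1)).map (fun t => parSum 1 0 (array.take t)))
                             i ((j : Int) + 1));
             if m < tmp then (tmp, (j : Int)) else (m, o.getD 0)) := by
        unfold altStep
        rw [if_neg (by simp [hne])]
      rw [hstep, hstep2]
      simp only
      by_cases hm : m < (if (j : Int) < i
            then oddsumB ((List.range (array.length + 1)).map (fun t => parSum 0 0 (array.take t)))
                         ((List.range (array.length + 1)).map (fun t => parSum 1 0 (array.take t)))
                         (j : Int) (min (i + 1) (array.length : Int))
            else oddsumB ((List.range (array.length + 1)).map (fun t => parSum 0 0 (array.take t)))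
                         ((List.range (array.length + 1)).map (fun t => parSum 1 0 (array.take t)))
                         i ((j : Int) + 1))
      · rw [if_pos hm, if_pos hm]
        have := ih ht (if (j : Int) < i
            then oddsumB ((List.range (array.length + 1)).map (fun t => parSum 0 0 (array.take t)))
                         ((List.range (array.length + 1)).map (fun t => parSum 1 0 (array.take t)))
                         (j : Int) (min (i + 1) (array.length : Int))
            else oddsumB ((List.range (array.length + 1)).map (fun t => parSum 0 0 (array.take t)))
                         ((List.range (array.length + 1)).map (fun t => parSum 1 0 (array.take t)))
                         i ((j : Int) + 1)) (some (j : Int))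
        simpa using this
      · rw [if_neg hm, if_neg hm]
        exact ih ht m o

-- ===== VERDICT (by name: the statement is the Claim_ definition above) =====
theorem aoki_spec : Claim_equal_aoki := by
  intro i array _ hpre
  unfold Spec_aoki aoki aoki_alt
  have hb := build_eq array array.length (le_refl _)
  simp only [hb]
  exact (fold_sim i array hpre.1 (List.range array.length)
    (fun j hj => List.mem_range.mp hj) (-100000000) none).2
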